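-- pv_equiv track=rewrite | github.com/apple/GCGC | Jupyter-everything/scripts/plot_data.py | __calculate_freemem
-- ===== SOURCE A (Python) =====
-- def __calculate_freemem(data_dictionary, inital_free, before = False, after = False):
--     if not data_dictionary:
--         return []
--
--     free_mem = []
--     keys = list(data_dictionary.keys())
--     # if any sections did not collect data, remove them.
--     for i in range(len(keys)):
--         if not data_dictionary[keys[i]]:
--             del data_dictionary[keys[i]]
--
--     for idx in range(len(data_dictionary["Eden"])):
--
--         # Calculate the free memory before the GC runs
--         if before:
--             temp_val = 0
--             for key in data_dictionary.keys():
--                 if str(key) != "Time":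
--                                             # access tuple [0] from list
--                                             # of tuples associated with key
--                     temp_val += int(data_dictionary[key][idx][0])
--             free_mem.append(int(inital_free - temp_val))
--
--         # Calculate the free memory after the GC runs
--         if after:
--             temp_val = 0
--             for key in data_dictionary.keys():
--                 if str(key) != "Time":
--                     temp_val += int(data_dictionary[key][idx][1])
--             free_mem.append(int(inital_free - temp_val))
--
--     return free_mem
-- ===== SOURCE B (Python) =====
-- def __calculate_freemem(data_dictionary, inital_free, before = False, after = False):
--     if not data_dictionary:
--         return []
--
--     # same side effect as the original: drop sections that collected no data
--     for key in [k for k, v in data_dictionary.items() if not v]: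
--         del data_dictionary[key]
--
--     n = len(data_dictionary["Eden"])
--     # column-major: one pass over the sections, accumulating per-index
--     # (before, after) occupancy sums elementwise
--     sums = [(0, 0)] * n
--     for key, value in data_dictionary.items():
--         if str(key) != "Time":
--             sums = [(sb + int(p[0]), sa + int(p[1])) for (sb, sa), p in zip(sums, value)]
--
--     free_mem = []
--     for sb, sa in sums:
--         if before:
--             free_mem.append(int(inital_free - sb))
--         if after:
--             free_mem.append(int(inital_free - sa))
--     return free_mem
-- ===== Notes on version B (the rewrite author's own statement) =====
-- stated objective: alternative
-- what changed: Replaces the per-index loop that re-scans the whole dictionary twice (once for the before-sum, once for the after-sum) with a single column-major pass accumulating elementwise (before, after) sum pairs via zip, followed by a simple emit loop over the accumulated pairs.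
import Mathlib
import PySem

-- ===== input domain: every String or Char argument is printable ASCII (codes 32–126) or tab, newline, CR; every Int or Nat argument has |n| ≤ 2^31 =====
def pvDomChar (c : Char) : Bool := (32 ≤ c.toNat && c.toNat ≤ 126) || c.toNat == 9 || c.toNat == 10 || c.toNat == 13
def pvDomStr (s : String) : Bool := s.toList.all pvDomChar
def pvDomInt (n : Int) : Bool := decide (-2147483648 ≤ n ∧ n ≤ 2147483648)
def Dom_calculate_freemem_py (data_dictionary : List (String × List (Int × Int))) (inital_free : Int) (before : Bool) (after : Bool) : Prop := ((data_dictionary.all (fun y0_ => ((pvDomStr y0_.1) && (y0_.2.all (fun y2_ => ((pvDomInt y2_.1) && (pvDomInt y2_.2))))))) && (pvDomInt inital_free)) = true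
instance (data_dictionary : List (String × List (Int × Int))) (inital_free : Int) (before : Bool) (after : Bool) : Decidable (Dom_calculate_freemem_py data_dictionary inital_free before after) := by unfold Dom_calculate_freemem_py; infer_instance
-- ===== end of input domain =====

-- B replaces A's per-index double dict scan by one column-major pass accumulating
-- (before, after) sum pairs; return-value equivalence only (both Pythons perform the
-- same in-place deletion of empty-valued keys from the argument dict).

-- ===== PORT A =====
-- shared prologue: the dict argument (last value wins for a repeated key), with
-- empty-valued entries deleted (the first loop of both Pythons)
def pvLiveSections (data_dictionary : List (String × List (Int × Int))) : List (String × List (Int × Int)) :=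
  (PySem.Dict.ofList data_dictionary).items.filter (fun kv => !kv.2.isEmpty)

-- data_dictionary["Eden"] after the deletion pass (total form; Pre_ requires presence)
def pvEden (d : List (String × List (Int × Int))) : List (Int × Int) :=
  ((d.find? (fun kv => kv.1 == "Eden")).map Prod.snd).getD []

-- A's inner loop: temp_val over the dict keys, skipping "Time", projecting one tuple slot
def pvColSum (d : List (String × List (Int × Int))) (proj : (Int × Int) → Int) (idx : Int) : Int :=
  d.foldl (fun t kv => if kv.1 ≠ "Time" then t + proj (PySem.List.pyGetD kv.2 idx (0, 0)) else t) 0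

def calculate_freemem_py (data_dictionary : List (String × List (Int × Int))) (inital_free : Int) (before : Bool) (after : Bool) : List Int :=
  if data_dictionary = [] then []
  else
    let d := pvLiveSections data_dictionary
    (PySem.List.pyRange 0 (PySem.List.len (pvEden d)) 1).foldl (fun fm idx =>
      let fm1 := if before then fm ++ [inital_free - pvColSum d Prod.fst idx] else fm
      if after then fm1 ++ [inital_free - pvColSum d Prod.snd idx] else fm1) []

-- ===== PORT B =====
def calculate_freemem_py_alt (data_dictionary : List (String × List (Int × Int))) (inital_free : Int) (before : Bool) (after : Bool) : List Int :=
  if data_dictionary = [] then []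
  else
    let d := pvLiveSections data_dictionary
    let n := (pvEden d).length
    let sums := d.foldl (fun acc kv =>
        if kv.1 ≠ "Time" then List.zipWith (fun s p => (s.1 + p.1, s.2 + p.2)) acc kv.2 else acc)
      (List.replicate n ((0 : Int), (0 : Int)))
    sums.foldl (fun fm s =>
      let fm1 := if before then fm ++ [inital_free - s.1] else fm
      if after then fm1 ++ [inital_free - s.2] else fm1) []

-- ===== PRECONDITION & SPEC =====
-- Pre_ excludes exactly the inputs where Python A raises: "Eden" missing (or empty, hence
-- deleted) -> KeyError, or, when a flag is set, some surviving non-"Time" section shorter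
-- than Eden's series -> IndexError.
def Pre_calculate_freemem_py (data_dictionary : List (String × List (Int × Int))) (inital_free : Int) (before : Bool) (after : Bool) : Prop :=
  data_dictionary = [] ∨
    (((pvLiveSections data_dictionary).find? (fun kv => kv.1 == "Eden")).isSome = true ∧
      ((before || after) = true →
        ∀ kv ∈ pvLiveSections data_dictionary, kv.1 ≠ "Time" →
          (pvEden (pvLiveSections data_dictionary)).length ≤ kv.2.length))
instance (data_dictionary : List (String × List (Int × Int))) (inital_free : Int) (before : Bool) (after : Bool) : Decidable (Pre_calculate_freemem_py data_dictionary inital_free before after) := by unfold Pre_calculate_freemem_py; infer_instance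

def pvWitness_calculate_freemem_py : (List (String × List (Int × Int))) × Int × Bool × Bool :=
  ([("Eden", [(1, 2), (3, 4)]), ("Old", [(5, 6), (7, 8)]), ("Time", [])], 100, true, true)

def Spec_calculate_freemem_py (data_dictionary : List (String × List (Int × Int))) (inital_free : Int) (before : Bool) (after : Bool) (out : List Int) : Prop := out = calculate_freemem_py_alt data_dictionary inital_free before after
instance (data_dictionary : List (String × List (Int × Int))) (inital_free : Int) (before : Bool) (after : Bool) (out : List Int) : Decidable (Spec_calculate_freemem_py data_dictionary inital_free before after out) := by unfold Spec_calculate_freemem_py; infer_instance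

-- ===== CLAIM (what is proved, stated in full; the proofs are below) =====
def Claim_equal_calculate_freemem_py : Prop := ∀ (data_dictionary : List (String × List (Int × Int))) (inital_free : Int) (before : Bool) (after : Bool), Dom_calculate_freemem_py data_dictionary inital_free before after → Pre_calculate_freemem_py data_dictionary inital_free before after → Spec_calculate_freemem_py data_dictionary inital_free before after (calculate_freemem_py data_dictionary inital_free before after)

-- ===== LEMMAS AND PROOFS =====

-- zipWith over a range-map, when the second list is long enough, is a pointwise map
lemma pv_zipWith_map_range {α β : Type} (f : α → β → α) (g : Nat → α) (v : List β) (n : Nat)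
    (hv : n ≤ v.length) (dflt : β) :
    List.zipWith f ((List.range n).map g) v = (List.range n).map (fun i => f (g i) (v.getD i dflt)) := by
  apply List.ext_getElem
  · simp [hv]
  · intro i h1 h2
    simp only [List.getElem_zipWith, List.getElem_map, List.getElem_range]
    have hi : i < n := by simpa using h2
    rw [List.getD_eq_getElem v dflt (by omega)]

lemma pv_colSum_append (d : List (String × List (Int × Int))) (kv : String × List (Int × Int))
    (proj : (Int × Int) → Int) (idx : Int) :
    pvColSum (d ++ [kv]) proj idx =
      if kv.1 ≠ "Time" then pvColSum d proj idx + proj (PySem.List.pyGetD kv.2 idx (0, 0))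
      else pvColSum d proj idx := by
  simp [pvColSum, List.foldl_append]

-- the accumulated pair list of B is the per-index pair of A's column sums
lemma pv_sums_eq (d : List (String × List (Int × Int))) (n : Nat)
    (hlen : ∀ kv ∈ d, kv.1 ≠ "Time" → n ≤ kv.2.length) :
    d.foldl (fun acc kv =>
        if kv.1 ≠ "Time" then List.zipWith (fun s p => (s.1 + p.1, s.2 + p.2)) acc kv.2 else acc)
      (List.replicate n ((0 : Int), (0 : Int)))
    = (List.range n).map (fun i : Nat => (pvColSum d Prod.fst (i : Int), pvColSum d Prod.snd (i : Int))) := by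
  induction d using List.reverseRecOn with
  | nil =>
      simp [pvColSum]
  | append_singleton d kv ih =>
      have hd : ∀ kv ∈ d, kv.1 ≠ "Time" → n ≤ kv.2.length := by
        intro x hx; exact hlen x (by simp [hx])
      rw [List.foldl_append, ih hd]
      simp only [List.foldl_cons, List.foldl_nil]
      by_cases ht : kv.1 ≠ "Time"
      · have hk : n ≤ kv.2.length := hlen kv (by simp) ht
        rw [if_pos ht, pv_zipWith_map_range _ _ _ _ hk ((0 : Int), (0 : Int))]
        apply List.map_congr_left
        intro i hi
        have hin : i < n := List.mem_range.mp hi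
        have hget : PySem.List.pyGetD kv.2 (i : Int) ((0 : Int), (0 : Int)) = kv.2.getD i ((0 : Int), (0 : Int)) := by
          simp
        simp [pv_colSum_append, ht, hget]
      · rw [if_neg ht]
        apply List.map_congr_left
        intro i _
        simp [pv_colSum_append, ht]

-- the emit loop, as a flatMap
lemma pv_emit_foldl {α : Type} (l : List α) (fb fa : α → Int) (before after : Bool) (acc : List Int) :
    l.foldl (fun fm s =>
      let fm1 := if before then fm ++ [fb s] else fm
      if after then fm1 ++ [fa s] else fm1) acc
    = acc ++ l.flatMap (fun s => (if before then [fb s] else []) ++ (if after then [fa s] else [])) := by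
  have : (fun fm s =>
      let fm1 := if before then fm ++ [fb s] else fm
      if after then fm1 ++ [fa s] else fm1)
      = fun (fm : List Int) s => fm ++ ((if before then [fb s] else []) ++ (if after then [fa s] else [])) := by
    funext fm s
    cases before <;> cases after <;> simp
  rw [this, PySem.List.foldl_append_eq_flatMap]

-- ===== VERDICT (by name: the statement is the Claim_ definition above) =====
theorem calculate_freemem_py_spec : Claim_equal_calculate_freemem_py := by
  intro dd F before after _ hpre
  unfold Spec_calculate_freemem_py
  by_cases hnil : dd = []
  · simp [calculate_freemem_py, calculate_freemem_py_alt, hnil]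
  · rcases hpre with h | ⟨_, hlen⟩
    · exact absurd h hnil
    · simp only [calculate_freemem_py, calculate_freemem_py_alt]
      rw [if_neg hnil, if_neg hnil]
      by_cases hflag : (before || after) = true
      · rw [pv_sums_eq (pvLiveSections dd) (pvEden (pvLiveSections dd)).length (hlen hflag)]
        rw [pv_emit_foldl, pv_emit_foldl]
        rw [PySem.List.len_eq, PySem.List.pyRange_one]
        simp only [sub_zero, Int.toNat_natCast, List.flatMap_map]
        apply congrArg
        apply List.flatMap_congr  -- pointwise equality of the emitted chunks
        intro k _
        simp
      · have hb : before = false := by cases before <;> simp_all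
        have ha : after = false := by cases after <;> simp_all
        rw [hb, ha]
        rw [pv_emit_foldl, pv_emit_foldl]
        have e1 : ∀ {α : Type} (l : List α), l.flatMap (fun _ => ([] : List Int)) = [] :=
          fun l => List.flatMap_eq_nil_iff.mpr (by simp)
        simp only [if_neg (Bool.false_ne_true), List.append_nil, e1]
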